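-- pv_equiv track=rewrite | github.com/Antonio1988-creator/ifp-ia-and-big-data | Programacio_IA/Bloque3/Captacion_datos/web_scraping/scrape_marca_clasificacion.py | extract_team_and_points
-- ===== SOURCE A (Python) =====
-- def extract_team_and_points(row):
--     team = None
--     points = None
--
--     # Identificar columnas numéricas
--     numeric_cols = []
--     for i, c in enumerate(row):
--         # eliminar miles y otros caracteres
--         raw = c.replace(".", "").replace(",", "")
--         if raw.isdigit():
--             numeric_cols.append(i)
--
--     # Si hay columnas numéricas y la última es numérica, tomarla como puntos
--     if numeric_cols:
--         if numeric_cols[-1] == len(row) - 1: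
--             points = row[-1]
--     # elegir team como primera columna no numérica (excepto si empieza por '#')
--     for i, c in enumerate(row):
--         raw = c.strip()
--         if raw == "":
--             continue
--         # ignorar columnas que sólo contienen números o signos de posición
--         if raw.replace(".", "").isdigit() or raw.startswith("#"):
--             continue
--         team = raw
--         break
--
--     return team, points
-- ===== SOURCE B (Python) =====
-- def extract_team_and_points(row):
--     points = None
--     if row and row[-1].replace(".", "").replace(",", "").isdigit():
--         points = row[-1]
--     team = next(
--         (c.strip() for c in row
--          if c.strip()
--          and not (c.strip().replace(".", "").isdigit() or c.strip().startswith("#"))),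
--         None,
--     )
--     return team, points
-- ===== Notes on version B (the rewrite author's own statement) =====
-- stated objective: faster
-- what changed: B drops A's full pass that builds the list of numeric column indices, deciding points with a single O(1) check of the last cell, and expresses the team scan as a first-match generator/next instead of an index loop with break.
import Mathlib
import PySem

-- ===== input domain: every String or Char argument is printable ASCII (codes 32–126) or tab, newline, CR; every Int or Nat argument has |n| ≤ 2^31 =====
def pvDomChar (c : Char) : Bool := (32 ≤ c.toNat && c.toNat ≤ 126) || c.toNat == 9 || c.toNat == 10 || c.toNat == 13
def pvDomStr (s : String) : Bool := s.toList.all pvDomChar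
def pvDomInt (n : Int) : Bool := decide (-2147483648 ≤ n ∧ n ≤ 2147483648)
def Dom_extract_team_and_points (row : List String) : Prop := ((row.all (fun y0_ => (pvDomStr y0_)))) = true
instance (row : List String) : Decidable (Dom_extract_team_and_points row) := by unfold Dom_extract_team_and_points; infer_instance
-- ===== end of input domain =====

-- B replaces A's full index-building pass over the row by a single check of the last cell,
-- and expresses the team scan as a standard first-match find; return value only, same result.

-- ===== PORT A =====
-- raw = c.replace(".", "").replace(",", ""); raw.isdigit()
def pvNumPredA (c : String) : Bool :=
  PySem.Str.strIsdigit (PySem.Str.replace (PySem.Str.replace c "." "") "," "")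

-- the first for-loop of A: collect indices of numeric columns
def pvNumColsA (pairs : List (Int × String)) (acc : List Int) : List Int :=
  pairs.foldl (fun acc ic => if pvNumPredA ic.2 then acc ++ [ic.1] else acc) acc

-- the second for-loop of A with its break: first acceptable stripped cell
def pvTeamLoopA : List String → Option String
  | [] => none
  | c :: rest =>
    let raw := PySem.Str.strip c
    if raw = "" then pvTeamLoopA rest
    else if PySem.Str.strIsdigit (PySem.Str.replace raw "." "") || PySem.Str.startswith raw "#" then
      pvTeamLoopA rest
    else some raw

def extract_team_and_points (row : List String) : Option String × Option String :=
  let numeric_cols := pvNumColsA (PySem.List.enumerate row 0) []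
  let points : Option String :=
    if numeric_cols ≠ [] then
      if numeric_cols.getLast? = some ((row.length : Int) - 1) then
        PySem.List.pyGet? row (-1)   -- row[-1]; numeric_cols ≠ [] forces row ≠ []
      else none
    else none
  let team := pvTeamLoopA row
  (team, points)

-- ===== PORT B =====
-- B's team predicate: c.strip() truthy and not (digits-after-dots or '#'-prefixed)
def pvTeamPredB (c : String) : Bool :=
  let s := PySem.Str.strip c
  s ≠ "" && !(PySem.Str.strIsdigit (PySem.Str.replace s "." "") || PySem.Str.startswith s "#")

def extract_team_and_points_alt (row : List String) : Option String × Option String :=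
  let points : Option String :=
    match PySem.List.pyGet? row (-1) with   -- row[-1] if row else nothing
    | none => none
    | some last =>
      if PySem.Str.strIsdigit (PySem.Str.replace (PySem.Str.replace last "." "") "," "") then
        some last
      else none
  let team := (row.find? pvTeamPredB).map (fun c => PySem.Str.strip c)
  (team, points)

-- ===== PRECONDITION & SPEC =====
def Spec_extract_team_and_points (row : List String) (out : Option String × Option String) : Prop := out = extract_team_and_points_alt row
instance (row : List String) (out : Option String × Option String) : Decidable (Spec_extract_team_and_points row out) := by unfold Spec_extract_team_and_points; infer_instance

-- ===== CLAIM (what is proved, stated in full; the proofs are below) =====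
def Claim_equal_extract_team_and_points : Prop := ∀ (row : List String), Dom_extract_team_and_points row → Spec_extract_team_and_points row (extract_team_and_points row)

-- ===== LEMMAS AND PROOFS =====

theorem pvNumColsA_append (p q : List (Int × String)) (acc : List Int) :
    pvNumColsA (p ++ q) acc = pvNumColsA q (pvNumColsA p acc) := by
  simp [pvNumColsA, List.foldl_append]

theorem pvNumColsA_mem (xs : List String) (s : Int) (acc : List Int) (i : Int)
    (h : i ∈ pvNumColsA (PySem.List.enumerate xs s) acc) :
    i ∈ acc ∨ (s ≤ i ∧ i < s + xs.length) := by
  induction xs generalizing s acc with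
  | nil => exact Or.inl (by simpa [pvNumColsA, PySem.List.enumerate] using h)
  | cons x xs ih =>
    simp only [PySem.List.enumerate] at h
    have h' : i ∈ (if pvNumPredA x then acc ++ [s] else acc) ∨
        (s + 1 ≤ i ∧ i < s + 1 + xs.length) := by
      apply ih
      simpa [pvNumColsA] using h
    rcases h' with h' | h'
    · split_ifs at h' with hp
      · rcases List.mem_append.1 h' with h'' | h''
        · exact Or.inl h''
        · simp at h''; subst h''; right; exact ⟨le_refl _, by simp⟩
      · exact Or.inl h'
    · right; simp; omega

theorem pvTeamLoopA_eq (row : List String) :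
    pvTeamLoopA row = (row.find? pvTeamPredB).map (fun c => PySem.Str.strip c) := by
  induction row with
  | nil => simp [pvTeamLoopA]
  | cons c rest ih =>
    simp only [pvTeamLoopA, List.find?]
    by_cases h1 : PySem.Str.strip c = ""
    · simp [pvTeamPredB, h1, ih]
    · by_cases hd : PySem.Chars.strIsdigit
          (PySem.Chars.replace (PySem.Chars.strip c.toList) ['.'] []) = true <;>
      by_cases hh : PySem.Chars.startswith (PySem.Chars.strip c.toList) ['#'] = true <;>
      simp [pvTeamPredB, h1, hd, hh, ih]

theorem points_eq (row : List String) :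
    (let numeric_cols := pvNumColsA (PySem.List.enumerate row 0) []
     if numeric_cols ≠ [] then
       if numeric_cols.getLast? = some ((row.length : Int) - 1) then
         PySem.List.pyGet? row (-1)
       else none
     else none) =
    (match PySem.List.pyGet? row (-1) with
     | none => none
     | some last =>
       if PySem.Str.strIsdigit (PySem.Str.replace (PySem.Str.replace last "." "") "," "") then
         some last
       else none) := by
  induction row using List.reverseRecOn with
  | nil => simp [pvNumColsA, PySem.List.enumerate, PySem.List.pyGet?, PySem.List.pyIdx?]
  | append_singleton xs x ih =>
    clear ih
    have hen : PySem.List.enumerate (xs ++ [x]) 0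
        = PySem.List.enumerate xs 0 ++ [((xs.length : Int), x)] := by
      simpa using PySem.List.enumerate_append xs [x] 0
    have hget : PySem.List.pyGet? (xs ++ [x]) (-1) = some x :=
      PySem.List.pyGet?_neg_one_append_singleton xs x
    simp only [hen, pvNumColsA_append, hget]
    by_cases hp : pvNumPredA x
    · have : pvNumColsA [((xs.length : Int), x)] (pvNumColsA (PySem.List.enumerate xs 0) [])
          = pvNumColsA (PySem.List.enumerate xs 0) [] ++ [(xs.length : Int)] := by
        simp [pvNumColsA, hp]
      rw [this]
      have hlen : ((xs ++ [x]).length : Int) - 1 = (xs.length : Int) := by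
        simp
      simp [pvNumPredA] at hp ⊢
      simp [hp]
    · have : pvNumColsA [((xs.length : Int), x)] (pvNumColsA (PySem.List.enumerate xs 0) [])
          = pvNumColsA (PySem.List.enumerate xs 0) [] := by
        simp [pvNumColsA, hp]
      rw [this]
      have hpx : ¬ PySem.Str.strIsdigit
          (PySem.Str.replace (PySem.Str.replace x "." "") "," "") = true := by
        simpa [pvNumPredA] using hp
      simp only [hpx, Bool.false_eq_true]
      set N := pvNumColsA (PySem.List.enumerate xs 0) [] with hN
      by_cases hne : N = []
      · simp [hne]
      · have hlast : ∃ v, N.getLast? = some v := by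
          cases hv : N.getLast? with
          | none => exact absurd (List.getLast?_eq_none_iff.mp hv) hne
          | some v => exact ⟨v, rfl⟩
        obtain ⟨v, hv⟩ := hlast
        have hvmem : v ∈ N := List.mem_of_getLast? hv
        have hb := pvNumColsA_mem xs 0 [] v (hN ▸ hvmem)
        simp at hb
        have hlen2 : ((xs ++ [x]).length : Int) - 1 = (xs.length : Int) := by simp
        have hne' : N.getLast? ≠ some ((xs.length : Int)) := by
          rw [hv]; intro hc; simp at hc; omega
        simp [hne, hne']

-- ===== VERDICT (by name: the statement is the Claim_ definition above) =====
theorem extract_team_and_points_spec : Claim_equal_extract_team_and_points := by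
  intro row _
  unfold Spec_extract_team_and_points extract_team_and_points extract_team_and_points_alt
  rw [pvTeamLoopA_eq]
  exact congrArg _ (points_eq row)
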